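-- pv_equiv track=rewrite | github.com/MatrixFounder/Universal-skills | skills/xlsx/scripts/xlsx_check_rules/dsl_parser.py | _find_top_level_cmp_op
-- ===== SOURCE A (Python) =====
-- def _find_top_level_cmp_op(s: str) -> tuple[str | None, int]:
--     """Find LAST CMP_OP at top level (not in parens/brackets); two-char ops
--     take precedence over single (`<=` not `<` then `=`)."""
--     depth = 0
--     last_op: str | None = None
--     last_idx = -1
--     i = 0
--     n = len(s)
--     while i < n:
--         c = s[i]
--         if c in "([":
--             depth += 1
--         elif c in ")]":
--             depth -= 1
--         elif depth == 0:
--             for op in ("<=", ">=", "==", "!="):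
--                 if s.startswith(op, i):
--                     last_op, last_idx = op, i
--                     i += len(op) - 1
--                     break
--             else:
--                 if c in "<>" and (i + 1 >= n or s[i + 1] not in "="):
--                     last_op, last_idx = c, i
--         i += 1
--     return last_op, last_idx
-- ===== SOURCE B (Python) =====
-- def _find_top_level_cmp_op(s: str) -> tuple[str | None, int]:
--     # Pass 1: enumerate every operator occurrence (maximal munch), ignoring depth.
--     matches = []
--     i, n = 0, len(s)
--     while i < n:
--         if s[i:i + 2] in ("<=", ">=", "==", "!="):
--             matches.append((i, s[i:i + 2]))
--             i += 2
--         elif s[i] in "<>":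
--             matches.append((i, s[i]))
--             i += 1
--         else:
--             i += 1
--     # Pass 2: keep occurrences whose bracket depth at their start index is 0.
--     top = [(op, j) for j, op in matches
--            if sum(c in "([" for c in s[:j]) - sum(c in ")]" for c in s[:j]) == 0]
--     return top[-1] if top else (None, -1)
-- ===== Notes on version B (the rewrite author's own statement) =====
-- stated objective: alternative
-- what changed: A's single fused scan (depth counter, operator matching and last-occurrence tracking interleaved in one while loop) is split into two independent passes: first enumerate every operator occurrence by maximal munch with no depth bookkeeping, then keep only occurrences whose bracket depth over the prefix s[:j] is zero and return the last one.
import Mathlib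
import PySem

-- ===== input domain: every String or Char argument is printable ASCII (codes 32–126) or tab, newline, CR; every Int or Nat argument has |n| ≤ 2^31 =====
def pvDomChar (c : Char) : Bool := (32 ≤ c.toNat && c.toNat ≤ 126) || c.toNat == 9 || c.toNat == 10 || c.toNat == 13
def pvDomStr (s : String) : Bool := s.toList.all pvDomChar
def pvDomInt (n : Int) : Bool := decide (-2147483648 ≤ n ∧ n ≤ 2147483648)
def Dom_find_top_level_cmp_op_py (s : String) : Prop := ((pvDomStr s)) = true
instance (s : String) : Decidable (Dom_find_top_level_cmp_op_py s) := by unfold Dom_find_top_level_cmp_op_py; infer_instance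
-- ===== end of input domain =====

-- B replaces A's single fused scan (depth + match + last tracking in one loop) by two passes:
-- enumerate all operator occurrences first, then filter by bracket depth of the prefix and take the last (objective: alternative decomposition; a timing run measured B faster).


-- ===== PORT A =====
-- A's while loop: one fused scan carrying (i, depth, last_op, last_idx); the inner
-- `for op in ("<=", ">=", "==", "!=")` succeeds exactly when s[i] ∈ "<>=!" and s[i+1] = '=',
-- and the matched op is then s[i] followed by '='.
def findAuxA : List Char → Int → Int → Option String → Int → Option String × Int
  | [], _, _, lastOp, lastIdx => (lastOp, lastIdx)
  | c :: rest, i, depth, lastOp, lastIdx =>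
    if c = '(' ∨ c = '[' then findAuxA rest (i + 1) (depth + 1) lastOp lastIdx
    else if c = ')' ∨ c = ']' then findAuxA rest (i + 1) (depth - 1) lastOp lastIdx
    else if depth = 0 then
      if (c = '<' ∨ c = '>' ∨ c = '=' ∨ c = '!') ∧ rest.head? = some '=' then
        findAuxA rest.tail (i + 2) depth (some (String.ofList [c, '='])) i
      else if c = '<' ∨ c = '>' then
        findAuxA rest (i + 1) depth (some (String.ofList [c])) i
      else findAuxA rest (i + 1) depth lastOp lastIdx
    else findAuxA rest (i + 1) depth lastOp lastIdx
termination_by l _ _ _ _ => l.length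
decreasing_by all_goals first
  | (simp only [hr, List.length_tail, List.length_cons]; omega)
  | (simp only [List.length_tail, List.length_cons]; omega)

def find_top_level_cmp_op_py (s : String) : Option String × Int :=
  findAuxA s.toList 0 0 none (-1)

-- ===== PORT B =====
-- Pass 1 of B: enumerate every operator occurrence (maximal munch: s[i:i+2] in the
-- two-char ops first, else a lone '<' or '>'), with no depth bookkeeping at all.
def scanOps : List Char → Int → List (Int × String)
  | [], _ => []
  | c :: rest, i =>
    if (c = '<' ∨ c = '>' ∨ c = '=' ∨ c = '!') ∧ rest.head? = some '=' then
      (i, String.ofList [c, '=']) :: scanOps rest.tail (i + 2)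
    else if c = '<' ∨ c = '>' then
      (i, String.ofList [c]) :: scanOps rest (i + 1)
    else scanOps rest (i + 1)
termination_by l _ => l.length
decreasing_by all_goals (simp only [List.length_tail, List.length_cons]; omega)

-- bracket depth of a prefix: sum(c in "([" for c in pre) - sum(c in ")]" for c in pre)
def depthPrefix (l : List Char) : Int :=
  ((l.countP fun c => c == '(' || c == '[') : Int) - ((l.countP fun c => c == ')' || c == ']') : Int)

def find_top_level_cmp_op_py_alt (s : String) : Option String × Int :=
  let l := s.toList
  let top := (scanOps l 0).filterMap (fun m =>
    if depthPrefix (PySem.List.slice l none (some m.1)) = 0 then some (m.2, m.1) else none)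
  match top.getLast? with
  | some (op, j) => (some op, j)
  | none => (none, -1)

-- ===== PRECONDITION & SPEC =====
def Spec_find_top_level_cmp_op_py (s : String) (out : Option String × Int) : Prop := out = find_top_level_cmp_op_py_alt s
instance (s : String) (out : Option String × Int) : Decidable (Spec_find_top_level_cmp_op_py s out) := by unfold Spec_find_top_level_cmp_op_py; infer_instance

-- ===== CLAIM (what is proved, stated in full; the proofs are below) =====
def Claim_equal_find_top_level_cmp_op_py : Prop := ∀ (s : String), Dom_find_top_level_cmp_op_py s → Spec_find_top_level_cmp_op_py s (find_top_level_cmp_op_py s)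

-- ===== LEMMAS AND PROOFS =====

-- "last kept occurrence, else the carried accumulator" — the shape of both results
def mergeLast (o : Option String) (j : Int) (t : List (String × Int)) : Option String × Int :=
  match t.getLast? with
  | some (op, k) => (some op, k)
  | none => (o, j)

theorem mergeLast_cons (o : Option String) (j : Int) (p : String × Int) (t : List (String × Int)) :
    mergeLast o j (p :: t) = mergeLast (some p.1) p.2 t := by
  simp only [mergeLast, List.getLast?_cons]
  cases h : t.getLast? with
  | none => simp
  | some q => cases q; simp

-- A's scan with B's consumption discipline: maximal munch everywhere, depth tracked,
-- only depth-0 occurrences kept (the intermediate program both passes are compared to).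
def topM : List Char → Int → Int → List (String × Int)
  | [], _, _ => []
  | c :: rest, i, d =>
    if c = '(' ∨ c = '[' then topM rest (i + 1) (d + 1)
    else if c = ')' ∨ c = ']' then topM rest (i + 1) (d - 1)
    else if (c = '<' ∨ c = '>' ∨ c = '=' ∨ c = '!') ∧ rest.head? = some '=' then
      (if d = 0 then [(String.ofList [c, '='], i)] else []) ++ topM rest.tail (i + 2) d
    else if c = '<' ∨ c = '>' then
      (if d = 0 then [(String.ofList [c], i)] else []) ++ topM rest (i + 1) d
    else topM rest (i + 1) d
termination_by l _ _ => l.length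
decreasing_by all_goals (simp only [List.length_tail, List.length_cons]; omega)

theorem findAuxA_eq_topM : ∀ (l : List Char) (i d : Int) (o : Option String) (j : Int),
    findAuxA l i d o j = mergeLast o j (topM l i d)
  | [], i, d, o, j => by simp [findAuxA, topM, mergeLast]
  | c :: rest, i, d, o, j => by
    rw [findAuxA, topM]
    by_cases h1 : c = '(' ∨ c = '['
    · simp only [if_pos h1]
      exact findAuxA_eq_topM rest (i + 1) (d + 1) o j
    by_cases h2 : c = ')' ∨ c = ']'
    · simp only [if_neg h1, if_pos h2]
      exact findAuxA_eq_topM rest (i + 1) (d - 1) o j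
    by_cases h3 : (c = '<' ∨ c = '>' ∨ c = '=' ∨ c = '!') ∧ rest.head? = some '='
    · obtain ⟨r, hr⟩ : ∃ r, rest = '=' :: r := by
        cases rest with
        | nil => simp at h3
        | cons a r => simp only [List.head?_cons, Option.some.injEq] at h3; exact ⟨r, by rw [h3.2]⟩
      subst hr
      by_cases hd : d = 0
      · subst hd
        simp only [if_neg h1, if_neg h2, if_pos h3, ite_true, List.tail_cons,
          List.singleton_append]
        rw [mergeLast_cons]
        exact findAuxA_eq_topM r (i + 2) 0 (some (String.ofList [c, '='])) i
      · simp only [if_neg h1, if_neg h2, if_pos h3, if_neg hd, List.tail_cons, List.nil_append]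
        rw [findAuxA]
        have e1 : ¬(('=' : Char) = '(' ∨ ('=' : Char) = '[') := by decide
        have e2 : ¬(('=' : Char) = ')' ∨ ('=' : Char) = ']') := by decide
        simp only [if_neg e1, if_neg e2, if_neg hd]
        have e : i + 1 + 1 = i + 2 := by ring
        rw [e]
        exact findAuxA_eq_topM r (i + 2) d o j
    by_cases h4 : c = '<' ∨ c = '>'
    · by_cases hd : d = 0
      · subst hd
        simp only [if_neg h1, if_neg h2, if_neg h3, if_pos h4, ite_true, List.singleton_append]
        rw [mergeLast_cons]
        exact findAuxA_eq_topM rest (i + 1) 0 (some (String.ofList [c])) i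
      · simp only [if_neg h1, if_neg h2, if_neg h3, if_pos h4, if_neg hd, List.nil_append]
        exact findAuxA_eq_topM rest (i + 1) d o j
    · by_cases hd : d = 0
      · simp only [if_neg h1, if_neg h2, if_neg h3, if_neg h4, if_pos hd]
        exact findAuxA_eq_topM rest (i + 1) d o j
      · simp only [if_neg h1, if_neg h2, if_neg h3, if_neg h4, if_neg hd]
        exact findAuxA_eq_topM rest (i + 1) d o j
termination_by l _ _ _ _ => l.length
decreasing_by all_goals first
  | (simp only [hr, List.length_tail, List.length_cons]; omega)
  | (simp only [List.length_tail, List.length_cons]; omega)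

theorem scanOps_lb : ∀ (l : List Char) (i : Int), ∀ m ∈ scanOps l i, i ≤ m.1
  | [], i => by simp [scanOps]
  | c :: rest, i => by
    intro m hm
    rw [scanOps] at hm
    split at hm
    · rcases List.mem_cons.1 hm with h | h
      · subst h; simp
      · have := scanOps_lb rest.tail (i + 2) m h; omega
    · split at hm
      · rcases List.mem_cons.1 hm with h | h
        · subst h; simp
        · have := scanOps_lb rest (i + 1) m h; omega
      · have := scanOps_lb rest (i + 1) m hm; omega
termination_by l _ => l.length
decreasing_by all_goals (simp only [List.length_tail, List.length_cons]; omega)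

theorem depthPrefix_nil : depthPrefix [] = 0 := by simp [depthPrefix]

theorem depthPrefix_cons_zero (c : Char) (t : List Char)
    (h1 : ¬(c = '(' ∨ c = '[')) (h2 : ¬(c = ')' ∨ c = ']')) :
    depthPrefix (c :: t) = depthPrefix t := by
  push_neg at h1 h2
  simp [depthPrefix, List.countP_cons, beq_iff_eq, h1.1, h1.2, h2.1, h2.2]

theorem depthPrefix_cons_open (c : Char) (t : List Char) (h : c = '(' ∨ c = '[') :
    depthPrefix (c :: t) = depthPrefix t + 1 := by
  rcases h with rfl | rfl <;> simp [depthPrefix, List.countP_cons] <;> push_cast <;> ring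

theorem depthPrefix_cons_close (c : Char) (t : List Char) (h : c = ')' ∨ c = ']') :
    depthPrefix (c :: t) = depthPrefix t - 1 := by
  rcases h with rfl | rfl <;> simp [depthPrefix, List.countP_cons] <;> push_cast <;> ring

theorem topM_eq_filter : ∀ (l : List Char) (i d : Int),
    topM l i d = (scanOps l i).filterMap (fun m =>
      if d + depthPrefix (l.take (m.1 - i).toNat) = 0 then some (m.2, m.1) else none)
  | [], i, d => by simp [topM, scanOps]
  | c :: rest, i, d => by
    rw [topM, scanOps]
    by_cases h3 : (c = '<' ∨ c = '>' ∨ c = '=' ∨ c = '!') ∧ rest.head? = some '='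
    · have h1 : ¬(c = '(' ∨ c = '[') := by rcases h3.1 with rfl | rfl | rfl | rfl <;> decide
      have h2 : ¬(c = ')' ∨ c = ']') := by rcases h3.1 with rfl | rfl | rfl | rfl <;> decide
      obtain ⟨r, hr⟩ : ∃ r, rest = '=' :: r := by
        cases rest with
        | nil => simp at h3
        | cons a r => simp only [List.head?_cons, Option.some.injEq] at h3; exact ⟨r, by rw [h3.2]⟩
      subst hr
      simp only [if_neg h1, if_neg h2, if_pos h3, List.tail_cons, List.filterMap_cons]
      have hhead : (i - i).toNat = 0 := by omega
      rw [hhead]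
      simp only [List.take_zero, depthPrefix_nil, add_zero]
      have htail : (scanOps r (i + 2)).filterMap (fun m =>
            if d + depthPrefix (r.take ((m.1 - (i + 2)).toNat)) = 0 then some (m.2, m.1) else none)
          = (scanOps r (i + 2)).filterMap (fun m =>
            if d + depthPrefix ((c :: '=' :: r).take ((m.1 - i).toNat)) = 0 then some (m.2, m.1) else none) := by
        apply List.filterMap_congr
        intro m hm
        have hlb : i + 2 ≤ m.1 := scanOps_lb r (i + 2) m hm
        have hk : (m.1 - i).toNat = (m.1 - (i + 2)).toNat + 2 := by omega
        rw [hk, List.take_succ_cons, List.take_succ_cons,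
            depthPrefix_cons_zero c _ h1 h2,
            depthPrefix_cons_zero '=' _ (by decide) (by decide)]
      rw [topM_eq_filter r (i + 2) d, htail]
      by_cases hd : d = 0 <;> simp [hd]
    · by_cases h1 : c = '(' ∨ c = '['
      · have h4 : ¬(c = '<' ∨ c = '>') := by rcases h1 with rfl | rfl <;> decide
        simp only [if_pos h1, if_neg h3, if_neg h4]
        rw [topM_eq_filter rest (i + 1) (d + 1)]
        apply List.filterMap_congr
        intro m hm
        have hlb : i + 1 ≤ m.1 := scanOps_lb rest (i + 1) m hm
        have hk : (m.1 - i).toNat = (m.1 - (i + 1)).toNat + 1 := by omega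
        rw [hk, List.take_succ_cons, depthPrefix_cons_open c _ h1]
        congr 1
        exact propext ⟨fun h => by omega, fun h => by omega⟩
      · by_cases h2 : c = ')' ∨ c = ']'
        · have h4 : ¬(c = '<' ∨ c = '>') := by rcases h2 with rfl | rfl <;> decide
          simp only [if_neg h1, if_pos h2, if_neg h3, if_neg h4]
          rw [topM_eq_filter rest (i + 1) (d - 1)]
          apply List.filterMap_congr
          intro m hm
          have hlb : i + 1 ≤ m.1 := scanOps_lb rest (i + 1) m hm
          have hk : (m.1 - i).toNat = (m.1 - (i + 1)).toNat + 1 := by omega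
          rw [hk, List.take_succ_cons, depthPrefix_cons_close c _ h2]
          congr 1
          exact propext ⟨fun h => by omega, fun h => by omega⟩
        · have htail : (scanOps rest (i + 1)).filterMap (fun m =>
                if d + depthPrefix (rest.take ((m.1 - (i + 1)).toNat)) = 0 then some (m.2, m.1) else none)
              = (scanOps rest (i + 1)).filterMap (fun m =>
                if d + depthPrefix ((c :: rest).take ((m.1 - i).toNat)) = 0 then some (m.2, m.1) else none) := by
            apply List.filterMap_congr
            intro m hm
            have hlb : i + 1 ≤ m.1 := scanOps_lb rest (i + 1) m hm
            have hk : (m.1 - i).toNat = (m.1 - (i + 1)).toNat + 1 := by omega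
            rw [hk, List.take_succ_cons, depthPrefix_cons_zero c _ h1 h2]
          by_cases h4 : c = '<' ∨ c = '>'
          · simp only [if_neg h1, if_neg h2, if_neg h3, if_pos h4, List.filterMap_cons]
            have hhead : (i - i).toNat = 0 := by omega
            rw [hhead]
            simp only [List.take_zero, depthPrefix_nil, add_zero]
            rw [topM_eq_filter rest (i + 1) d, htail]
            by_cases hd : d = 0 <;> simp [hd]
          · simp only [if_neg h1, if_neg h2, if_neg h3, if_neg h4]
            rw [topM_eq_filter rest (i + 1) d, htail]
termination_by l _ _ => l.length
decreasing_by all_goals first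
  | (simp only [hr, List.length_tail, List.length_cons]; omega)
  | (simp only [List.length_tail, List.length_cons]; omega)

-- ===== VERDICT (by name: the statement is the Claim_ definition above) =====
theorem find_top_level_cmp_op_py_spec : Claim_equal_find_top_level_cmp_op_py := by
  intro s _
  unfold Spec_find_top_level_cmp_op_py find_top_level_cmp_op_py find_top_level_cmp_op_py_alt
  rw [findAuxA_eq_topM, topM_eq_filter]
  have hcongr : (scanOps s.toList 0).filterMap (fun m =>
        if (0 : Int) + depthPrefix (s.toList.take ((m.1 - 0).toNat)) = 0 then some (m.2, m.1) else none)
      = (scanOps s.toList 0).filterMap (fun m =>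
        if depthPrefix (PySem.List.slice s.toList none (some m.1)) = 0 then some (m.2, m.1) else none) := by
    apply List.filterMap_congr
    intro m hm
    have h0 : (0 : Int) ≤ m.1 := scanOps_lb s.toList 0 m hm
    rw [PySem.List.slice_to _ h0]
    simp
  rw [hcongr]
  cases ht : ((scanOps s.toList 0).filterMap (fun m =>
      if depthPrefix (PySem.List.slice s.toList none (some m.1)) = 0 then some (m.2, m.1) else none)).getLast? with
  | none => simp [mergeLast, ht]
  | some p => cases p with | mk op j => simp [mergeLast, ht]
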